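-- pv_equiv track=rewrite | github.com/tadashi9e/fd_watcher | fd_viewer.py | decode_flags
-- ===== SOURCE A (Python) =====
-- O_ACCMODE = 0x00000003
--
-- O_RDONLY  = 0x00000000
--
-- O_WRONLY  = 0x00000001
--
-- O_RDWR    = 0x00000002
--
-- O_FLAGS = {
--     0x00000100: "CREAT",
--     0x00000200: "EXCL",
--     0x00000400: "NOCTTY",
--     0x00001000: "TRUNC",
--     0x00002000: "APPEND",
--     0x00004000: "NONBLOCK",
--     0x00010000: "DSYNC",
--     0x00020000: "FASYNC",
--     0x00040000: "DIRECT",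
--     0x00100000: "LARGEFILE",
--     0x00200000: "DIRECTORY",
--     0x00400000: "NOFOLLOW",
--     0x01000000: "NOATIME",
--     0x02000000: "CLOEXEC",
-- }
--
-- def decode_flags(hex_flags : str) -> str:
--     try:
--         flags = int(hex_flags, 16)
--         accmode = flags & O_ACCMODE
--         names = ['RDONLY' if accmode == O_RDONLY else
--                  'WRONLY' if accmode == O_WRONLY else
--                  'RDWR' if accmode == O_RDWR else
--                  hex(accmode)]
--         for b in sorted(O_FLAGS):
--             if flags & b:
--                 names.append(O_FLAGS[b])
--         return '|'.join(names)
--     except: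
--         return hex_flags
-- ===== SOURCE B (Python) =====
-- O_FLAGS = {
--     0x00000100: "CREAT",
--     0x00000200: "EXCL",
--     0x00000400: "NOCTTY",
--     0x00001000: "TRUNC",
--     0x00002000: "APPEND",
--     0x00004000: "NONBLOCK",
--     0x00010000: "DSYNC",
--     0x00020000: "FASYNC",
--     0x00040000: "DIRECT",
--     0x00100000: "LARGEFILE",
--     0x00200000: "DIRECTORY",
--     0x00400000: "NOFOLLOW",
--     0x01000000: "NOATIME",
--     0x02000000: "CLOEXEC",
-- }
--
-- # union of all known flag bits
-- _FLAG_MASK = 0x03777700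
--
-- def decode_flags(hex_flags: str) -> str:
--     try:
--         flags = int(hex_flags, 16)
--     except ValueError:
--         return hex_flags
--     names = [('RDONLY', 'WRONLY', 'RDWR', '0x3')[flags & 0x3]]
--     rem = flags & _FLAG_MASK
--     while rem:
--         b = rem & -rem          # isolate lowest set bit
--         rem &= rem - 1          # clear it
--         names.append(O_FLAGS[b])
--     return '|'.join(names)
-- ===== Notes on version B (the rewrite author's own statement) =====
-- stated objective: alternative
-- what changed: Instead of scanning all 14 dictionary keys and testing each against the flag word, B masks the word to the known flag bits once and then iterates only over the actually-set bits with the lowest-set-bit trick (b = rem & -rem; rem &= rem - 1), looking each isolated bit up directly in O_FLAGS; the accmode name comes from a tuple indexed by flags & 3.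
import Mathlib
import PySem

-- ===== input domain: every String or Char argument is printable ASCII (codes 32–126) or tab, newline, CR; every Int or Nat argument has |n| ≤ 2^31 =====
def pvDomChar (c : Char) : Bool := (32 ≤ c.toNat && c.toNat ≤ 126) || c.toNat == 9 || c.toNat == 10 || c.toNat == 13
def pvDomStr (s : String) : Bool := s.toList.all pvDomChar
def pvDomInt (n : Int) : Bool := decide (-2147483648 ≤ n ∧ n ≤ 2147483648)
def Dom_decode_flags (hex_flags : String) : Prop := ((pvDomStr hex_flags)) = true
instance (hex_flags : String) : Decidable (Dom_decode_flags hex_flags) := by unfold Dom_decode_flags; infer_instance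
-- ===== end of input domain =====

-- B re-implements the flag decoder by iterating over the set bits of the masked flag word
-- (lowest-set-bit extraction) instead of scanning the full fixed key dictionary (objective: alternative).

-- ===== PORT A =====

-- the module constant O_FLAGS (shared by both Pythons)
def oflags : PySem.Dict Int String := PySem.Dict.ofList
  [(0x00000100, "CREAT"), (0x00000200, "EXCL"), (0x00000400, "NOCTTY"),
   (0x00001000, "TRUNC"), (0x00002000, "APPEND"), (0x00004000, "NONBLOCK"),
   (0x00010000, "DSYNC"), (0x00020000, "FASYNC"), (0x00040000, "DIRECT"),
   (0x00100000, "LARGEFILE"), (0x00200000, "DIRECTORY"), (0x00400000, "NOFOLLOW"),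
   (0x01000000, "NOATIME"), (0x02000000, "CLOEXEC")]

-- hand port of Python's hex() on the values it is applied to here (0 ≤ n < 16, a single hex digit);
-- in A it is only ever reached with accmode = 3
def pyHex (n : Int) : String :=
  String.ofList ['0', 'x', Char.ofNat (if n < 10 then 48 + n.toNat else 87 + n.toNat)]

def decode_flags (hex_flags : String) : String :=
  match PySem.Int.ofStrBase? hex_flags 16 with
  | none => hex_flags   -- except: return hex_flags
  | some flags =>
    let accmode := PySem.Int.band flags 3
    let names : List String :=
      [if accmode = 0 then "RDONLY" else
       if accmode = 1 then "WRONLY" else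
       if accmode = 2 then "RDWR" else pyHex accmode]
    let names := (PySem.List.sorted oflags.keys (fun k => k)).foldl
      (fun ns b => if PySem.Int.band flags b ≠ 0
                   then ns ++ [(oflags.get? b).getD ""]   -- O_FLAGS[b]; b is always a key here
                   else ns) names
    PySem.Str.join "|" names

-- ===== PORT B =====

-- union of all known flag bits (_FLAG_MASK in Source B)
def flagMask : Int := 0x03777700

-- the while-loop of Source B; Python's rem is always nonnegative (rem = flags & _FLAG_MASK,
-- then it only loses bits), so the Nat carrier is exact
def lowLoop (rem : Nat) (names : List String) : List String :=
  if _h : rem = 0 then names   -- while rem: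
  else
    let b : Int := PySem.Int.band (rem : Int) (-(rem : Int))          -- b = rem & -rem
    let rem' : Nat := (PySem.Int.band (rem : Int) ((rem : Int) - 1)).toNat  -- rem &= rem - 1
    lowLoop rem' (names ++ [(oflags.get? b).getD ""])                 -- names.append(O_FLAGS[b])
termination_by rem
decreasing_by
  have h1 : ((rem : Int) - 1) = ((rem - 1 : Nat) : Int) := by
    have : 1 ≤ rem := Nat.one_le_iff_ne_zero.mpr _h
    omega
  rw [h1, PySem.Int.band_natCast]
  have := Nat.and_le_right (n := rem) (m := rem - 1)
  simp only [Int.toNat_natCast]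
  omega

def decode_flags_alt (hex_flags : String) : String :=
  match PySem.Int.ofStrBase? hex_flags 16 with
  | none => hex_flags   -- except ValueError: return hex_flags
  | some flags =>
    let accName := (PySem.List.pyGet? ["RDONLY", "WRONLY", "RDWR", "0x3"]
                     (PySem.Int.band flags 3)).getD ""   -- index is always in 0..3
    let rem := (PySem.Int.band flags flagMask).toNat     -- rem = flags & _FLAG_MASK (≥ 0)
    PySem.Str.join "|" (lowLoop rem [accName])

-- ===== PRECONDITION & SPEC =====
def Spec_decode_flags (hex_flags : String) (out : String) : Prop := out = decode_flags_alt hex_flags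
instance (hex_flags : String) (out : String) : Decidable (Spec_decode_flags hex_flags out) := by unfold Spec_decode_flags; infer_instance

-- ===== CLAIM (what is proved, stated in full; the proofs are below) =====
def Claim_equal_decode_flags : Prop := ∀ (hex_flags : String), Dom_decode_flags hex_flags → Spec_decode_flags hex_flags (decode_flags hex_flags)

-- ===== LEMMAS AND PROOFS =====

-- Python's infinite-two's-complement bit of an Int
def pvTb (a : Int) (j : Nat) : Bool :=
  if 0 ≤ a then a.toNat.testBit j else !((-a - 1).toNat.testBit j)

-- the bit indices of the 14 keys of O_FLAGS, ascending
def idxs : List Nat := [8, 9, 10, 12, 13, 14, 16, 17, 18, 20, 21, 22, 24, 25]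

def maskOf (is : List Nat) : Nat := is.foldr (fun i m => 2 ^ i ||| m) 0

-- ---- pure Nat bit toolbox ----

theorem pv_add_eq_xor_of_and_eq_zero (x : Nat) : ∀ y : Nat, x &&& y = 0 → x + y = x ^^^ y := by
  induction x using Nat.strong_induction_on with
  | _ x ih =>
    intro y h
    rcases Nat.eq_zero_or_pos x with hx | hx
    · subst hx; simp
    have hbit : ∀ j, (x.testBit j && y.testBit j) = false := by
      intro j
      have := congrArg (fun t => Nat.testBit t j) h
      simp only [Nat.testBit_and, Nat.zero_testBit] at this
      exact this
    have hdiv : (x / 2) &&& (y / 2) = 0 := by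
      apply Nat.eq_of_testBit_eq
      intro j
      simp only [Nat.testBit_and, Nat.testBit_div_two, Nat.zero_testBit]
      exact hbit (j + 1)
    have ih2 := ih (x / 2) (Nat.div_lt_self hx (by norm_num)) (y / 2) hdiv
    have h0 : ¬ (x % 2 = 1 ∧ y % 2 = 1) := by
      intro ⟨h1, h2⟩
      have := hbit 0
      simp [Nat.testBit_zero, h1, h2] at this
    have hxeq : x = 2 * (x / 2) + x % 2 := by omega
    have hyeq : y = 2 * (y / 2) + y % 2 := by omega
    have hxor : x ^^^ y = 2 ^ 1 * ((x / 2) ^^^ (y / 2)) + (x % 2 + y % 2) := by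
      apply Nat.eq_of_testBit_eq
      intro j
      have hr : x % 2 + y % 2 < 2 ^ 1 := by omega
      rw [Nat.testBit_xor, Nat.testBit_two_pow_mul_add _ hr]
      rcases Nat.lt_or_ge j 1 with hj | hj
      · interval_cases j
        simp only [if_pos (by omega : (0:Nat) < 1), Nat.testBit_zero]
        rcases Nat.mod_two_eq_zero_or_one x with h1 | h1 <;>
          rcases Nat.mod_two_eq_zero_or_one y with h2 | h2 <;>
            simp [h1, h2]
      · rw [if_neg (by omega)]
        obtain ⟨j', rfl⟩ : ∃ j', j = j' + 1 := ⟨j - 1, by omega⟩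
        simp [Nat.testBit_xor, ← Nat.testBit_div_two]
    rw [pow_one] at hxor
    rw [hxor, ← ih2]
    omega

theorem pv_sub_eq_xor (M d : Nat) (h : d &&& M = d) : M - d = M ^^^ d := by
  have hpt : ∀ j, (d.testBit j && M.testBit j) = d.testBit j := by
    intro j
    have := congrArg (fun t => Nat.testBit t j) h
    simp only [Nat.testBit_and] at this
    exact this
  have hdisj : (M ^^^ d) &&& d = 0 := by
    apply Nat.eq_of_testBit_eq
    intro j
    have := hpt j
    simp only [Nat.testBit_and, Nat.testBit_xor, Nat.zero_testBit]
    cases hdj : d.testBit j <;> cases hMj : M.testBit j <;> simp_all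
  have hadd : (M ^^^ d) + d = M := by
    rw [pv_add_eq_xor_of_and_eq_zero _ _ hdisj, Nat.xor_assoc, Nat.xor_self, Nat.xor_zero]
  omega

theorem pv_dle : ∀ (M c : Nat), (M &&& c) &&& M = M &&& c := by
  intro M c
  apply Nat.eq_of_testBit_eq
  intro j
  simp only [Nat.testBit_and]
  cases M.testBit j <;> cases c.testBit j <;> rfl

-- ---- PySem.Int.band facts ----

theorem pv_band_nat_nonneg (a : Int) (M : Nat) : 0 ≤ PySem.Int.band a (M : Int) := by
  unfold PySem.Int.band
  split_ifs with h1 h2 h3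
  · exact Int.natCast_nonneg _
  · exact absurd (Int.natCast_nonneg M) h2
  · exact Int.natCast_nonneg _
  · exact absurd (Int.natCast_nonneg M) h3

theorem pv_band_nat_testBit (a : Int) (M : Nat) (j : Nat) :
    ((PySem.Int.band a (M : Int)).toNat).testBit j = (pvTb a j && M.testBit j) := by
  unfold PySem.Int.band pvTb
  by_cases ha : 0 ≤ a
  · simp only [if_pos ha, if_pos (by positivity : (0:Int) ≤ (M:Int))]
    simp [Nat.testBit_and, Bool.and_comm]
  · simp only [if_neg ha, if_pos (by positivity : (0:Int) ≤ (M:Int))]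
    have hM : ((M : Int)).toNat = M := Int.toNat_natCast M
    rw [hM]
    set c := (-a - 1).toNat with hc
    have hsub : M - (M &&& c) = M ^^^ (M &&& c) := pv_sub_eq_xor M (M &&& c) (pv_dle M c)
    simp only [Int.toNat_natCast, hsub, Nat.testBit_xor, Nat.testBit_and]
    cases M.testBit j <;> cases c.testBit j <;> rfl

theorem pv_band_pow (a : Int) (i : Nat) :
    PySem.Int.band a ((2 ^ i : Nat) : Int) = if pvTb a i then ((2 ^ i : Nat) : Int) else 0 := by
  have hnn := pv_band_nat_nonneg a (2 ^ i)
  have htn : (PySem.Int.band a ((2 ^ i : Nat) : Int)).toNat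
      = (if pvTb a i then 2 ^ i else 0) := by
    apply Nat.eq_of_testBit_eq
    intro j
    rw [pv_band_nat_testBit, Nat.testBit_two_pow]
    cases h : pvTb a i <;> by_cases hj : i = j <;>
      simp_all [Nat.zero_testBit]
  rw [← Int.toNat_of_nonneg hnn, htn]
  split_ifs <;> simp

-- ---- maskOf facts ----

theorem pv_maskOf_testBit (is : List Nat) (j : Nat) :
    (maskOf is).testBit j = is.any (fun i => decide (i = j)) := by
  induction is with
  | nil =>
    have h0 : maskOf [] = 0 := rfl
    rw [h0, Nat.zero_testBit]
    rfl
  | cons i rest ih =>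
    have h1 : maskOf (i :: rest) = 2 ^ i ||| maskOf rest := rfl
    rw [h1, Nat.testBit_or, Nat.testBit_two_pow, ih, List.any_cons]

-- ---- the lowest-set-bit step ----

theorem pv_lowbit_step (n i : Nat) (hbit : n.testBit i = true)
    (hlow : ∀ j, j < i → n.testBit j = false) :
    n &&& (n - 1) = 2 ^ (i + 1) * (n / 2 ^ (i + 1)) ∧
    n - (n &&& (n - 1)) = 2 ^ i := by
  have hmod : n % 2 ^ (i + 1) = 2 ^ i := by
    apply Nat.eq_of_testBit_eq
    intro j
    rw [Nat.testBit_mod_two_pow, Nat.testBit_two_pow]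
    by_cases hj : j = i
    · subst hj; simp [hbit]
    · have hij : (decide (i = j)) = false := by simp [Ne.symm hj]
      rw [hij]
      by_cases hji : j < i
      · simp [hlow j hji]
      · simp [show ¬ j < i + 1 by omega]
  set q := n / 2 ^ (i + 1) with hq
  have hdm := Nat.div_add_mod n (2 ^ (i + 1))
  rw [hmod] at hdm
  have hn : n = 2 ^ (i + 1) * q + 2 ^ i := hdm.symm
  have hpos : 0 < 2 ^ i := pow_pos (by norm_num) i
  have hn1 : n - 1 = 2 ^ (i + 1) * q + (2 ^ i - 1) := by omega
  have hand : n &&& (n - 1) = 2 ^ (i + 1) * q := by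
    apply Nat.eq_of_testBit_eq
    intro j
    have h1 : (2:Nat) ^ i < 2 ^ (i + 1) := by
      exact Nat.pow_lt_pow_right (by norm_num) (Nat.lt_succ_self i)
    have h2 : (2:Nat) ^ i - 1 < 2 ^ (i + 1) := by omega
    have h0 : (0:Nat) < 2 ^ (i + 1) := pow_pos (by norm_num) _
    rw [Nat.testBit_and, hn1, hn]
    rw [Nat.testBit_two_pow_mul_add _ h1, Nat.testBit_two_pow_mul_add _ h2]
    have h3 : (2 ^ (i + 1) * q).testBit j
        = (2 ^ (i + 1) * q + 0).testBit j := by norm_num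
    rw [h3, Nat.testBit_two_pow_mul_add _ h0]
    by_cases hj : j < i + 1
    · rw [if_pos hj, if_pos hj, if_pos hj,
        Nat.testBit_two_pow, Nat.testBit_two_pow_sub_one, Nat.zero_testBit]
      by_cases hij : i = j
      · subst hij; simp
      · simp [hij]
    · rw [if_neg hj, if_neg hj, if_neg hj, Bool.and_self]
  constructor
  · exact hand
  · rw [hand]; omega

-- ---- main loop lemma ----

theorem pv_lowLoop_eq (is : List Nat) : ∀ (n : Nat) (acc : List String),
    is.Pairwise (· < ·) →
    n &&& maskOf is = n →
    lowLoop n acc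
      = acc ++ (is.filter (fun i => n.testBit i)).map
          (fun i => (oflags.get? ((2 ^ i : Nat) : Int)).getD "") := by
  induction is with
  | nil =>
    intro n acc _ hmask
    have : n = 0 := by
      have : maskOf ([] : List Nat) = 0 := rfl
      rw [this] at hmask
      simpa using hmask.symm
    subst this
    rw [lowLoop]
    simp
  | cons i rest ih =>
    intro n acc hpair hmask
    have hpair' : rest.Pairwise (· < ·) := hpair.tail
    have hgt : ∀ j ∈ rest, i < j := fun j hj => (List.pairwise_cons.mp hpair).1 j hj
    have hnbit : ∀ j, n.testBit j = (n.testBit j && (maskOf (i :: rest)).testBit j) := by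
      intro j
      have := congrArg (fun t => Nat.testBit t j) hmask
      simp only [Nat.testBit_and] at this
      exact this.symm
    by_cases hb : n.testBit i = true
    · -- lowest set bit of n is i
      have hlow : ∀ j, j < i → n.testBit j = false := by
        intro j hj
        have hany : ((i :: rest).any (fun k => decide (k = j))) = false := by
          rw [List.any_eq_false]
          intro k hk
          have hkj : k ≠ j := by
            rcases List.mem_cons.mp hk with rfl | hk'
            · omega
            · have := hgt k hk'; omega
          simp [hkj]
        rw [hnbit j, pv_maskOf_testBit, hany, Bool.and_false]
      obtain ⟨hand, hsub⟩ := pv_lowbit_step n i hb hlow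
      have hne : n ≠ 0 := by
        intro h; rw [h] at hb; simp [Nat.zero_testBit] at hb
      have hpos : 1 ≤ n := Nat.one_le_iff_ne_zero.mpr hne
      rw [lowLoop, dif_neg hne]
      have hcast1 : ((n : Int) - 1) = ((n - 1 : Nat) : Int) := by omega
      -- the isolated bit:  n & -n = n - (n &&& (n-1)) = 2^i
      have hbval : PySem.Int.band (n : Int) (-(n : Int)) = ((2 ^ i : Nat) : Int) := by
        unfold PySem.Int.band
        have hnn : (0:Int) ≤ (n : Int) := by positivity
        have hneg : ¬ (0:Int) ≤ -(n : Int) := by omega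
        rw [if_pos hnn, if_neg hneg]
        have : (-(-(n : Int)) - 1).toNat = n - 1 := by omega
        rw [this]
        simp only [Int.toNat_natCast]
        rw [hsub]
      have hremval : (PySem.Int.band (n : Int) ((n : Int) - 1)).toNat = n &&& (n - 1) := by
        rw [hcast1, PySem.Int.band_natCast, Int.toNat_natCast]
      set n' := n &&& (n - 1) with hn'
      -- the cleared word keeps exactly the remaining mask bits
      have hntb : ∀ j, n'.testBit j = if j < i + 1 then false else n.testBit j := by
        intro j
        rw [hand]
        have h0 : (0:Nat) < 2 ^ (i + 1) := pow_pos (by norm_num) _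
        have h3 : (2 ^ (i + 1) * (n / 2 ^ (i + 1))).testBit j
            = (2 ^ (i + 1) * (n / 2 ^ (i + 1)) + 0).testBit j := by norm_num
        rw [h3, Nat.testBit_two_pow_mul_add _ h0]
        by_cases hj : j < i + 1
        · simp [hj, Nat.zero_testBit]
        · simp only [if_neg hj]
          rw [Nat.testBit_div_two_pow]
          congr 1
          omega
      have hmask' : n' &&& maskOf rest = n' := by
        apply Nat.eq_of_testBit_eq
        intro j
        rw [Nat.testBit_and, hntb j]
        by_cases hj : j < i + 1
        · simp [hj]
        · simp only [if_neg hj]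
          cases hnj : n.testBit j
          · rfl
          · have := hnbit j
            rw [hnj, pv_maskOf_testBit] at this
            simp only [Bool.true_and, List.any_cons] at this
            have hij : (decide (i = j)) = false := by
              simp only [decide_eq_false_iff_not]; omega
            rw [hij] at this
            simp only [Bool.false_or] at this
            rw [pv_maskOf_testBit, ← this]
            simp
      have hrec := ih n' (acc ++ [(oflags.get? (((2 : Nat) ^ i : Nat) : Int)).getD ""]) hpair' hmask'
      simp only [hbval, hremval]
      rw [hrec]
      have hfilter : rest.filter (fun j => n'.testBit j) = rest.filter (fun j => n.testBit j) := by
        apply List.filter_congr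
        intro j hj
        rw [hntb j, if_neg (by have := hgt j hj; omega)]
      rw [hfilter]
      simp [hb]
    · -- bit i not set: it contributes nothing and the mask shrinks
      have hmask' : n &&& maskOf rest = n := by
        apply Nat.eq_of_testBit_eq
        intro j
        rw [Nat.testBit_and]
        cases hnj : n.testBit j
        · rfl
        · have := hnbit j
          rw [hnj, pv_maskOf_testBit] at this
          simp only [Bool.true_and, List.any_cons] at this
          have hij : (decide (i = j)) = false := by
            simp only [decide_eq_false_iff_not]
            intro h; subst h
            rw [hnj] at hb; exact hb rfl
          rw [hij] at this
          simp only [Bool.false_or] at this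
          rw [pv_maskOf_testBit, ← this]
          simp
      rw [ih n acc hpair' hmask']
      have : (i :: rest).filter (fun j => n.testBit j) = rest.filter (fun j => n.testBit j) := by
        rw [List.filter_cons]
        simp [hb]
      rw [this]

-- ---- accmode range ----

theorem pv_band3_range (a : Int) : 0 ≤ PySem.Int.band a 3 ∧ PySem.Int.band a 3 < 4 := by
  unfold PySem.Int.band
  split_ifs with h1 h2 h3
  · have h := Nat.and_le_right (n := a.toNat) (m := Int.toNat 3)
    have h3' : Int.toNat 3 = 3 := rfl
    refine ⟨Int.natCast_nonneg _, ?_⟩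
    omega
  · omega
  · have h3' : Int.toNat 3 = 3 := rfl
    have h := Nat.sub_le (Int.toNat 3) (Int.toNat 3 &&& (-a - 1).toNat)
    refine ⟨Int.natCast_nonneg _, ?_⟩
    omega
  · omega

-- Prop-level version of the loop-shape lemma PySem.List.foldl_append_if (derived from it)
theorem pv_foldl_append_if {α β : Type} (p : α → Prop) [DecidablePred p] (f : α → β)
    (l : List α) (acc : List β) :
    List.foldl (fun acc x => if p x then acc ++ [f x] else acc) acc l
      = acc ++ (l.filter (fun x => decide (p x))).map f := by
  have h := PySem.List.foldl_append_if (fun x => decide (p x)) f l acc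
  simpa using h

-- ---- the main body equality, for every parsed flag word ----

theorem pv_body_eq (flags : Int) :
    (let accmode := PySem.Int.band flags 3
     let names : List String :=
       [if accmode = 0 then "RDONLY" else
        if accmode = 1 then "WRONLY" else
        if accmode = 2 then "RDWR" else pyHex accmode]
     let names := (PySem.List.sorted oflags.keys (fun k => k)).foldl
       (fun ns b => if PySem.Int.band flags b ≠ 0
                    then ns ++ [(oflags.get? b).getD ""]
                    else ns) names
     PySem.Str.join "|" names)
    = (let accName := (PySem.List.pyGet? ["RDONLY", "WRONLY", "RDWR", "0x3"]
                        (PySem.Int.band flags 3)).getD ""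
       let rem := (PySem.Int.band flags flagMask).toNat
       PySem.Str.join "|" (lowLoop rem [accName])) := by
  -- the accmode head element agrees
  obtain ⟨h0, h4⟩ := pv_band3_range flags
  have hacc :
      (if PySem.Int.band flags 3 = 0 then "RDONLY" else
       if PySem.Int.band flags 3 = 1 then "WRONLY" else
       if PySem.Int.band flags 3 = 2 then "RDWR" else pyHex (PySem.Int.band flags 3))
      = (PySem.List.pyGet? ["RDONLY", "WRONLY", "RDWR", "0x3"]
          (PySem.Int.band flags 3)).getD "" := by
    set m := PySem.Int.band flags 3 with hm
    interval_cases m <;> decide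
  -- the key list of O_FLAGS is already sorted
  have hsorted : PySem.List.sorted oflags.keys (fun k => k)
      = idxs.map (fun i => ((2 ^ i : Nat) : Int)) := by decide
  have hmaskeq : flagMask = ((maskOf idxs : Nat) : Int) := by decide
  set n := (PySem.Int.band flags flagMask).toNat with hn
  have hnmask : n &&& maskOf idxs = n := by
    apply Nat.eq_of_testBit_eq
    intro j
    rw [Nat.testBit_and, hn, hmaskeq, pv_band_nat_testBit]
    cases pvTb flags j <;> cases (maskOf idxs).testBit j <;> rfl
  have hpair : idxs.Pairwise (· < ·) := by decide
  have hloop := pv_lowLoop_eq idxs n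
    [(PySem.List.pyGet? ["RDONLY", "WRONLY", "RDWR", "0x3"]
       (PySem.Int.band flags 3)).getD ""] hpair hnmask
  -- per-key conditions agree
  have hcond : ∀ i ∈ idxs,
      (PySem.Int.band flags ((2 ^ i : Nat) : Int) ≠ 0) ↔ n.testBit i = true := by
    intro i hi
    have hMi : (maskOf idxs).testBit i = true := by
      fin_cases hi <;> decide
    have hni : n.testBit i = pvTb flags i := by
      rw [hn, hmaskeq, pv_band_nat_testBit, hMi, Bool.and_true]
    rw [pv_band_pow, hni]
    cases pvTb flags i <;> simp
  show PySem.Str.join "|" _ = PySem.Str.join "|" _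
  rw [hacc, hsorted, hloop,
    pv_foldl_append_if (fun b => PySem.Int.band flags b ≠ 0) (fun b => (oflags.get? b).getD "")]
  congr 1
  rw [List.filter_map, List.map_map]
  have hcompf : ((fun b => (oflags.get? b).getD "") ∘ fun i : Nat => ((2 ^ i : Nat) : Int))
      = (fun i : Nat => (oflags.get? ((2 ^ i : Nat) : Int)).getD "") := rfl
  rw [hcompf]
  refine congrArg (HAppend.hAppend _) ?_
  refine congrArg (List.map (fun i : Nat => (oflags.get? ((2 ^ i : Nat) : Int)).getD "")) ?_
  apply List.filter_congr
  intro i hi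
  have h := hcond i hi
  cases hni : n.testBit i
  · rw [hni] at h
    simp only [Bool.false_eq_true, iff_false, not_not] at h
    simp only [Function.comp_apply, decide_eq_false_iff_not, not_not]
    exact_mod_cast h
  · rw [hni] at h
    have hne := h.mpr rfl
    simp only [Function.comp_apply, decide_eq_true_eq, ne_eq]
    exact_mod_cast hne

-- ===== VERDICT (by name: the statement is the Claim_ definition above) =====
theorem decode_flags_spec : Claim_equal_decode_flags := by
  intro hex_flags _
  unfold Spec_decode_flags decode_flags decode_flags_alt
  cases PySem.Int.ofStrBase? hex_flags 16 with
  | none => rfl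
  | some flags => exact pv_body_eq flags
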